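-- pv_equiv track=rewrite | github.com/smetanadvorak/programming_problems | codeforces/medium/dishonest_sellers/main.py | minimize_spendings
-- ===== SOURCE A (Python) =====
-- def minimize_spendings(n, k, a, b):
--
-- 	c = [a[i] - b[i] for i in range(len(a))]
--
-- 	inds = sorted(range(len(c)), key=lambda k:c[k])
-- 	c = [c[i] for i in inds]
--
-- 	honest = 0
-- 	while honest < len(a) and c[honest] <= 0:
-- 		honest += 1
--
-- 	k = max(k, honest)
--
-- 	during = inds[:k]
-- 	after = inds[k:]
--
-- 	return sum(a[i] for i in during) + sum(b[i] for i in after)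
-- ===== SOURCE B (Python) =====
-- def minimize_spendings(n, k, a, b):
--     total = 0
--     honest = 0
--     pos = []
--     for x, y in zip(a, b):
--         if x <= y:
--             total += x
--             honest += 1
--         else:
--             total += y
--             pos.append(x - y)
--     pos.sort()
--     return total + sum(pos[:max(k - honest, 0)])
-- ===== Notes on version B (the rewrite author's own statement) =====
-- stated objective: faster
-- what changed: Instead of argsorting all n indices by a[i]-b[i], rebuilding the reordered list, and slicing index lists, B does one pass over zip(a,b) taking the cheaper price and collecting only the positive differences, then sorts just those and adds back the max(k-honest,0) smallest ones.
import Mathlib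
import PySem

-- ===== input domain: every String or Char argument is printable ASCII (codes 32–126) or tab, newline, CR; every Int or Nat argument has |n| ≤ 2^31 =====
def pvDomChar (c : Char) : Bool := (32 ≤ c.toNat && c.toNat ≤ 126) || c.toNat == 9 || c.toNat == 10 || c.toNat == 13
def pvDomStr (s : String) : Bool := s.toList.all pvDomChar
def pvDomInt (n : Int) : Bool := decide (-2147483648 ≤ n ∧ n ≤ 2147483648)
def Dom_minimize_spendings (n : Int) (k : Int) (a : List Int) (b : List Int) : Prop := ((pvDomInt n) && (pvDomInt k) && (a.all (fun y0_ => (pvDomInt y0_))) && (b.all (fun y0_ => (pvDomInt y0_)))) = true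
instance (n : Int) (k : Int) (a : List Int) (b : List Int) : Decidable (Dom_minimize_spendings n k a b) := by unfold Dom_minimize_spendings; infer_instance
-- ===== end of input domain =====

-- B replaces A's full argsort/reorder/slice pipeline by a single pass over zip(a,b)
-- that takes the cheaper price and collects only the positive differences, sorting
-- just those; equal return value on Pre_ (a no longer than b).

-- ===== PORT A =====
-- the 'while honest < len(a) and c[honest] <= 0' loop, with fuel making it total
def msWhile (c : List Int) (la : Int) (honest : Int) : Nat → Int
  | 0 => honest
  | fuel+1 =>
      if honest < la ∧ PySem.List.pyGetD c honest 0 ≤ 0 then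
        msWhile c la (honest + 1) fuel
      else honest

def minimize_spendings (n : Int) (k : Int) (a : List Int) (b : List Int) : Int :=
  let c := (PySem.List.pyRange 0 (a.length : Int) 1).map
             (fun i => PySem.List.pyGetD a i 0 - PySem.List.pyGetD b i 0)
  let inds := PySem.List.sorted (PySem.List.pyRange 0 (c.length : Int) 1)
                (fun j => PySem.List.pyGetD c j 0) false
  let c2 := inds.map (fun i => PySem.List.pyGetD c i 0)
  let honest := msWhile c2 (a.length : Int) 0 (c2.length + 1)
  let k2 := max k honest
  let during := PySem.List.slice inds none (some k2)
  let after := PySem.List.slice inds (some k2) none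
  (during.map (fun i => PySem.List.pyGetD a i 0)).sum
    + (after.map (fun i => PySem.List.pyGetD b i 0)).sum

-- ===== PORT B =====
def minimize_spendings_alt (n : Int) (k : Int) (a : List Int) (b : List Int) : Int :=
  let st := (a.zip b).foldl
      (fun (st : Int × Int × List Int) p =>
        if p.1 ≤ p.2 then (st.1 + p.1, st.2.1 + 1, st.2.2)
        else (st.1 + p.2, st.2.1, st.2.2 ++ [p.1 - p.2]))
      (0, 0, [])
  let pos := PySem.List.sorted st.2.2 (fun x => x) false
  st.1 + (PySem.List.slice pos none (some (max (k - st.2.1) 0))).sum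

-- ===== PRECONDITION & SPEC =====
-- A indexes b by every index of a, so it raises IndexError when a is longer than b.
def Pre_minimize_spendings (n : Int) (k : Int) (a : List Int) (b : List Int) : Prop :=
  a.length ≤ b.length
instance (n : Int) (k : Int) (a : List Int) (b : List Int) : Decidable (Pre_minimize_spendings n k a b) := by unfold Pre_minimize_spendings; infer_instance

def pvWitness_minimize_spendings : Int × Int × List Int × List Int := (3, 1, [5, 3, 7], [4, 9, 2])

def Spec_minimize_spendings (n : Int) (k : Int) (a : List Int) (b : List Int) (out : Int) : Prop := out = minimize_spendings_alt n k a b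
instance (n : Int) (k : Int) (a : List Int) (b : List Int) (out : Int) : Decidable (Spec_minimize_spendings n k a b out) := by unfold Spec_minimize_spendings; infer_instance

-- ===== CLAIM (what is proved, stated in full; the proofs are below) =====
def Claim_equal_minimize_spendings : Prop := ∀ (n : Int) (k : Int) (a : List Int) (b : List Int), Dom_minimize_spendings n k a b → Pre_minimize_spendings n k a b → Spec_minimize_spendings n k a b (minimize_spendings n k a b)

-- ===== LEMMAS AND PROOFS =====

-- the while loop counts the leading nonpositive entries
theorem pv_msWhile_spec (pre suf : List Int) (fuel : Nat) (hf : suf.length ≤ fuel) :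
    msWhile (pre ++ suf) ((pre ++ suf).length : Int) (pre.length : Int) fuel
      = (pre.length : Int) + ((suf.takeWhile (fun x : Int => decide (x ≤ 0))).length : Int) := by
  induction suf generalizing pre fuel with
  | nil =>
      cases fuel with
      | zero => simp [msWhile]
      | succ f => simp [msWhile]
  | cons x rest ih =>
      cases fuel with
      | zero => simp at hf
      | succ f =>
        have hidx : PySem.List.pyGetD (pre ++ x :: rest) (pre.length : Int) 0 = x := by
          rw [PySem.List.pyGetD_natCast]
          simp
        by_cases hx : x ≤ 0
        · have hcond : ((pre.length : Int) < ((pre ++ x :: rest).length : Int)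
              ∧ PySem.List.pyGetD (pre ++ x :: rest) (pre.length : Int) 0 ≤ 0) := by
            constructor
            · simp
            · rw [hidx]; exact hx
          rw [msWhile, if_pos hcond]
          have hih := ih (pre ++ [x]) f (by simp at hf ⊢; omega)
          simp only [List.append_assoc, List.cons_append, List.nil_append] at hih
          rw [show ((pre.length : Int) + 1) = ((pre ++ [x]).length : Int) by simp, hih]
          simp [hx]
          omega
        · have hcond : ¬ ((pre.length : Int) < ((pre ++ x :: rest).length : Int)
              ∧ PySem.List.pyGetD (pre ++ x :: rest) (pre.length : Int) 0 ≤ 0) := by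
            rw [hidx]; intro h; exact hx h.2
          rw [msWhile, if_neg hcond]
          simp [hx]

-- characterization of B's fold
theorem pv_msFold_spec (pairs : List (Int × Int)) (t h : Int) (ps : List Int) :
    pairs.foldl
      (fun (st : Int × Int × List Int) p =>
        if p.1 ≤ p.2 then (st.1 + p.1, st.2.1 + 1, st.2.2)
        else (st.1 + p.2, st.2.1, st.2.2 ++ [p.1 - p.2]))
      (t, h, ps)
    = (t + (pairs.map (fun p => if p.1 ≤ p.2 then p.1 else p.2)).sum,
       h + (pairs.countP (fun p => decide (p.1 ≤ p.2)) : Int),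
       ps ++ (pairs.filter (fun p => !decide (p.1 ≤ p.2))).map (fun p => p.1 - p.2)) := by
  induction pairs generalizing t h ps with
  | nil => simp
  | cons p rest ih =>
      by_cases hp : p.1 ≤ p.2
      · rw [List.foldl_cons, if_pos hp, ih]
        simp only [Prod.mk.injEq]
        refine ⟨by simp [hp]; ring, by simp [hp]; push_cast; ring, by simp [hp]⟩
      · rw [List.foldl_cons, if_neg hp, ih]
        simp only [Prod.mk.injEq]
        refine ⟨by simp [hp]; ring, by simp [hp], by simp [hp]⟩

-- in a ≤-sorted list, everything after the nonpositive prefix is positive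
theorem pv_dropWhile_pos (l : List Int) (hp : l.Pairwise (· ≤ ·)) :
    ∀ x ∈ l.dropWhile (fun x : Int => decide (x ≤ 0)), 0 < x := by
  induction l with
  | nil => simp
  | cons y t ih =>
      by_cases hy : y ≤ 0
      · rw [List.dropWhile_cons_of_pos (by simp [hy])]
        exact ih (List.Pairwise.sublist (List.sublist_cons_self y t) hp)
      · rw [List.dropWhile_cons_of_neg (by simp [hy])]
        intro x hx
        rcases List.mem_cons.mp hx with rfl | hx
        · omega
        · have := (List.pairwise_cons.mp hp).1 x hx
          omega

theorem pv_sum_map_ite (l : List Int) :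
    (l.map (fun x => if x ≤ 0 then x else 0)).sum = (l.filter (fun x : Int => decide (x ≤ 0))).sum := by
  induction l with
  | nil => simp
  | cons x t ih =>
      by_cases hx : x ≤ 0 <;> simp [hx, ih]

theorem pv_sum_map_add {α : Type} (l : List α) (f g : α → Int) :
    (l.map (fun i => f i + g i)).sum = (l.map f).sum + (l.map g).sum := by
  induction l with
  | nil => simp
  | cons x t ih => simp [ih]; ring


-- proof-only abbreviations: the pairwise differences, their sorted order, and its
-- nonpositive prefix / positive suffix
def pvC (a b : List Int) : List Int := (a.zip b).map (fun p => p.1 - p.2)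
def pvS (a b : List Int) : List Int := PySem.List.sorted (pvC a b) (fun x => x) false
def pvTW (a b : List Int) : List Int := (pvS a b).takeWhile (fun x : Int => decide (x ≤ 0))
def pvDW (a b : List Int) : List Int := (pvS a b).dropWhile (fun x : Int => decide (x ≤ 0))

theorem pv_c_len (a b : List Int) (_hab : a.length ≤ b.length) :
    (pvC a b).length = a.length := by
  simp [pvC]; omega

theorem pv_c_eq (a b : List Int) (hab : a.length ≤ b.length) :
    (PySem.List.pyRange 0 (a.length : Int) 1).map
      (fun i => PySem.List.pyGetD a i 0 - PySem.List.pyGetD b i 0) = pvC a b := by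
  rw [PySem.List.pyRange_one]
  simp only [List.map_map]
  apply List.ext_getElem
  · simp [pvC]; omega
  · intro i h1 h2
    simp [pvC, List.getElem_zip]
    simp at h1
    rw [List.getElem?_eq_getElem (show i < a.length by omega),
        List.getElem?_eq_getElem (show i < b.length by omega)]
    simp

theorem pv_A_val (n k : Int) (a b : List Int) (hab : a.length ≤ b.length) :
    minimize_spendings n k a b
      = (b.take a.length).sum
        + ((pvS a b).take ((max k ((pvTW a b).length : Int)).toNat)).sum := by
  have hclen := pv_c_len a b hab
  simp only [minimize_spendings, pv_c_eq a b hab]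
  set cd := pvC a b with hc
  set key := fun j => PySem.List.pyGetD cd j 0 with hkey
  set inds := PySem.List.sorted (PySem.List.pyRange 0 (cd.length : Int) 1) key false with hinds
  set m := inds.map key with hm
  -- inds is a permutation of the index range, all its members in [0, len a)
  have hindperm : inds.Perm (PySem.List.pyRange 0 (cd.length : Int) 1) :=
    PySem.List.sorted_perm _ _ _
  have hmemind : ∀ i ∈ inds, 0 ≤ i ∧ i < (a.length : Int) := by
    intro i hi
    have : i ∈ PySem.List.pyRange 0 (cd.length : Int) 1 := hindperm.mem_iff.mp hi
    rw [PySem.List.mem_pyRange_one] at this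
    omega
  -- the reordered difference list m IS sorted(cd)
  have hmperm : m.Perm cd := by
    have h1 : m.Perm ((PySem.List.pyRange 0 (cd.length : Int) 1).map key) := hindperm.map key
    have h2 : (PySem.List.pyRange 0 (cd.length : Int) 1).map key = cd := by
      rw [hkey]
      exact PySem.List.map_pyGetD_pyRange_zero' cd 0
    rwa [h2] at h1
  have hmpair : m.Pairwise (· ≤ ·) := by
    have := PySem.List.sorted_map_key_pairwise (xs := PySem.List.pyRange 0 (cd.length : Int) 1) (key := key)
    exact this
  have hs : pvS a b = m := by
    simp only [pvS, ← hc]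
    exact PySem.List.sorted_id_eq_of_perm_of_pairwise _ _ hmperm hmpair
  -- the while loop counts the nonpositive prefix of m
  have hmlen : m.length = a.length := by
    rw [hm, List.length_map, hinds, PySem.List.length_sorted, PySem.List.length_pyRange_one]
    omega
  have hwhile : msWhile m (a.length : Int) 0 (m.length + 1)
      = ((pvTW a b).length : Int) := by
    have hws := pv_msWhile_spec [] m (m.length + 1) (by simp)
    simp only [List.nil_append, List.length_nil, Nat.cast_zero, zero_add] at hws
    rw [← hmlen, hws]
    simp only [pvTW, hs]
  rw [hwhile]
  set k2 := max k ((pvTW a b).length : Int) with hk2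
  have hk2nn : 0 ≤ k2 := le_trans (by positivity) (le_max_right _ _)
  rw [PySem.List.slice_to _ hk2nn, PySem.List.slice_from _ hk2nn]
  set t := k2.toNat with ht
  -- pointwise: a-price = b-price + difference, for every index in inds
  have hpoint : ∀ i ∈ inds, PySem.List.pyGetD a i 0 = PySem.List.pyGetD b i 0 + key i := by
    intro i hi
    obtain ⟨h0, hlt⟩ := hmemind i hi
    simp only [hkey]
    rw [PySem.List.pyGetD_eq_getElem a 0 h0 (by push_cast; omega),
        PySem.List.pyGetD_eq_getElem b 0 h0 (by push_cast; omega),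
        PySem.List.pyGetD_eq_getElem cd 0 h0 (by push_cast; omega)]
    have hia : i.toNat < a.length := by omega
    have hib : i.toNat < b.length := by omega
    have hic : i.toNat < cd.length := by omega
    have hval : cd[i.toNat] = a[i.toNat] - b[i.toNat] := by
      simp [hc, pvC, List.getElem_zip]
    omega
  have htake : ((inds.take t).map (fun i => PySem.List.pyGetD a i 0)).sum
      = ((inds.take t).map (fun i => PySem.List.pyGetD b i 0)).sum + (m.take t).sum := by
    have h1 : (inds.take t).map (fun i => PySem.List.pyGetD a i 0)
        = (inds.take t).map (fun i => PySem.List.pyGetD b i 0 + key i) :=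
      List.map_congr_left (fun i hi => hpoint i (List.mem_of_mem_take hi))
    rw [h1, pv_sum_map_add (inds.take t) (fun i => PySem.List.pyGetD b i 0) key,
        List.map_take, List.map_take, ← hm]
  rw [htake]
  -- the b-price sums over take and drop recombine to the whole index range
  have hbsum : ((inds.take t).map (fun i => PySem.List.pyGetD b i 0)).sum
      + ((inds.drop t).map (fun i => PySem.List.pyGetD b i 0)).sum
      = (b.take a.length).sum := by
    rw [← List.sum_append, ← List.map_append, List.take_append_drop]
    have hp : (inds.map (fun i => PySem.List.pyGetD b i 0)).Perm
        ((PySem.List.pyRange 0 (cd.length : Int) 1).map (fun i => PySem.List.pyGetD b i 0)) :=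
      hindperm.map _
    rw [hp.sum_eq]
    have hmap : (PySem.List.pyRange 0 (cd.length : Int) 1).map (fun i => PySem.List.pyGetD b i 0)
        = b.take a.length := by
      apply List.ext_getElem
      · simp [PySem.List.length_pyRange_one]
        omega
      · intro i h1 h2
        simp only [List.length_map, PySem.List.length_pyRange_one] at h1
        simp only [List.getElem_map, PySem.List.getElem_pyRange_one, zero_add]
        rw [PySem.List.pyGetD_natCast]
        rw [List.getD_eq_getElem _ _ (show i < b.length by omega)]
        simp [List.getElem_take]
    rw [hmap]
  rw [hs]
  omega

theorem pv_filter_map' (l : List (Int × Int)) (f : Int × Int → Int) (p : Int → Bool) :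
    (l.map f).filter p = (l.filter (fun x => p (f x))).map f := by
  induction l with
  | nil => simp
  | cons x t ih => by_cases h : p (f x) <;> simp [h, ih]

theorem pv_tw_all (a b : List Int) : ∀ x ∈ pvTW a b, x ≤ 0 := by
  intro x hx
  simpa using List.mem_takeWhile_imp hx

theorem pv_s_pair (a b : List Int) : (pvS a b).Pairwise (· ≤ ·) :=
  PySem.List.sorted_pairwise (pvC a b) (fun x => x)

theorem pv_dw_all (a b : List Int) : ∀ x ∈ pvDW a b, 0 < x :=
  pv_dropWhile_pos _ (pv_s_pair a b)

theorem pv_s_decomp (a b : List Int) : pvS a b = pvTW a b ++ pvDW a b :=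
  (List.takeWhile_append_dropWhile).symm

theorem pv_s_perm (a b : List Int) : (pvS a b).Perm (pvC a b) :=
  PySem.List.sorted_perm _ _ _

theorem pv_B_val (n k : Int) (a b : List Int) (hab : a.length ≤ b.length) :
    minimize_spendings_alt n k a b
      = ((b.take a.length).sum + (pvTW a b).sum)
        + ((pvDW a b).take ((max (k - ((pvTW a b).length : Int)) 0).toNat)).sum := by
  simp only [minimize_spendings_alt]
  rw [pv_msFold_spec]
  dsimp only
  simp only [zero_add, List.nil_append]
  set zl := a.zip b with hzl
  -- the picked-price sum splits into the b-prices plus the nonpositive differences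
  have hpick : zl.map (fun p => if p.1 ≤ p.2 then p.1 else p.2)
      = zl.map (fun p => p.2 + (if p.1 - p.2 ≤ 0 then p.1 - p.2 else 0)) := by
    apply List.map_congr_left
    intro p _
    by_cases h : p.1 ≤ p.2
    · rw [if_pos h, if_pos (by omega)]; ring
    · rw [if_neg h, if_neg (by omega)]; ring
  have hsnd : zl.map (fun p => p.2) = b.take a.length := by
    apply List.ext_getElem
    · simp [hzl]
    · intro i h1 h2
      simp [hzl, List.getElem_zip, List.getElem_take]
  have hite : zl.map (fun p => if p.1 - p.2 ≤ 0 then p.1 - p.2 else 0)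
      = (pvC a b).map (fun d => if d ≤ 0 then d else 0) := by
    rw [pvC, ← hzl, List.map_map]
    rfl
  have hfs : (pvS a b).filter (fun x : Int => decide (x ≤ 0)) = pvTW a b := by
    rw [pv_s_decomp a b, List.filter_append]
    rw [List.filter_eq_self.mpr (fun x hx => by simpa using pv_tw_all a b x hx)]
    rw [List.filter_eq_nil_iff.mpr (fun x hx => by have := pv_dw_all a b x hx; simp; omega)]
    simp
  have hsum1 : (zl.map (fun p => if p.1 ≤ p.2 then p.1 else p.2)).sum
      = (b.take a.length).sum + (pvTW a b).sum := by
    rw [hpick, pv_sum_map_add zl (fun p => p.2) (fun p => if p.1 - p.2 ≤ 0 then p.1 - p.2 else 0)]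
    rw [hsnd, hite, pv_sum_map_ite]
    have hperm : ((pvC a b).filter (fun x : Int => decide (x ≤ 0))).Perm
        ((pvS a b).filter (fun x : Int => decide (x ≤ 0))) :=
      ((pv_s_perm a b).filter _).symm
    rw [hperm.sum_eq, hfs]
  -- the count of cheap items is the nonpositive prefix length
  have hcnt : zl.countP (fun p => decide (p.1 ≤ p.2)) = (pvTW a b).length := by
    have h1 : zl.countP (fun p => decide (p.1 ≤ p.2))
        = (pvC a b).countP (fun x : Int => decide (x ≤ 0)) := by
      rw [pvC, ← hzl, List.countP_map]
      apply List.countP_congr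
      intro p _
      by_cases h : p.1 ≤ p.2
      · simp [h, show p.1 - p.2 ≤ 0 by omega]
      · simp [h, show ¬(p.1 - p.2 ≤ 0) by omega]
    rw [h1, ← (pv_s_perm a b).countP_eq, pv_s_decomp a b, List.countP_append]
    rw [List.countP_eq_length.mpr (fun x hx => by simpa using pv_tw_all a b x hx)]
    rw [List.countP_eq_zero.mpr (fun x hx => by have := pv_dw_all a b x hx; simp; omega)]
    omega
  -- the collected positive differences sort to the positive suffix
  have hpos : PySem.List.sorted
      ((zl.filter (fun p => !decide (p.1 ≤ p.2))).map (fun p => p.1 - p.2)) (fun x => x) false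
      = pvDW a b := by
    have hflt : (zl.filter (fun p => !decide (p.1 ≤ p.2))).map (fun p => p.1 - p.2)
        = (pvC a b).filter (fun x : Int => !decide (x ≤ 0)) := by
      rw [pvC, ← hzl, pv_filter_map' zl (fun p => p.1 - p.2) (fun x => !decide (x ≤ 0))]
      congr 1
      apply List.filter_congr
      intro p _
      by_cases h : p.1 ≤ p.2
      · simp [h, show p.1 - p.2 ≤ 0 by omega]
      · simp [h, show ¬(p.1 - p.2 ≤ 0) by omega]
    rw [hflt]
    apply PySem.List.sorted_id_eq_of_perm_of_pairwise
    · have hperm : ((pvC a b).filter (fun x : Int => !decide (x ≤ 0))).Perm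
          ((pvS a b).filter (fun x : Int => !decide (x ≤ 0))) :=
        ((pv_s_perm a b).filter _).symm
      have hfd : (pvS a b).filter (fun x : Int => !decide (x ≤ 0)) = pvDW a b := by
        rw [pv_s_decomp a b, List.filter_append]
        rw [List.filter_eq_nil_iff.mpr (fun x hx => by have := pv_tw_all a b x hx; simp; omega)]
        rw [List.filter_eq_self.mpr (fun x hx => by have := pv_dw_all a b x hx; simp; omega)]
        simp
      exact (hfd ▸ hperm).symm
    · exact List.Pairwise.sublist (List.dropWhile_sublist _) (pv_s_pair a b)
  rw [hsum1, hcnt, hpos, PySem.List.slice_to _ (le_max_right _ _)]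

theorem minimize_spendings_equal : ∀ (n : Int) (k : Int) (a : List Int) (b : List Int),
    Pre_minimize_spendings n k a b →
    minimize_spendings n k a b = minimize_spendings_alt n k a b := by
  intro n k a b hpre
  have hab : a.length ≤ b.length := hpre
  rw [pv_A_val n k a b hab, pv_B_val n k a b hab]
  rw [pv_s_decomp a b, List.take_append]
  have h1 : (pvTW a b).take ((max k ((pvTW a b).length : Int)).toNat) = pvTW a b :=
    List.take_of_length_le (by omega)
  have h2 : ((max k ((pvTW a b).length : Int)).toNat) - (pvTW a b).length
      = (max (k - ((pvTW a b).length : Int)) 0).toNat := by omega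
  rw [h1, h2, List.sum_append]
  ring

-- ===== VERDICT (by name: the statement is the Claim_ definition above) =====
theorem minimize_spendings_spec : Claim_equal_minimize_spendings := by
  intro n k a b _ hpre
  exact minimize_spendings_equal n k a b hpre
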